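-- pv_equiv track=rewrite | github.com/sh95fit/CodingTest | 백준/Silver/1485. 정사각형/정사각형.py | is_square
-- ===== SOURCE A (Python) =====
-- def distance_squared(x1, y1, x2, y2):
--     return (x2 - x1) ** 2 + (y2 - y1) ** 2
--
-- def is_square(points):
--     distances = []
--     for i in range(4):
--         for j in range(i + 1, 4):
--             distances.append(distance_squared(points[i][0], points[i][1], points[j][0], points[j][1]))
--
--     distances.sort()
--
--     if distances[0] == distances[1] == distances[2] == distances[3] and distances[4] == distances[5]:
--         return 1
--     return 0
-- ===== SOURCE B (Python) =====
-- def is_square(points):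
--     # Geometric test: some pairing of opposite vertices has diagonals that
--     # share a midpoint, are perpendicular and are equally long.
--     p0 = points[0]
--     p1 = points[1]
--     p2 = points[2]
--     p3 = points[3]
--     for a, b, c in ((p1, p2, p3), (p2, p1, p3), (p3, p1, p2)):
--         if p0[0] + a[0] == b[0] + c[0] and p0[1] + a[1] == b[1] + c[1]:
--             vx = a[0] - p0[0]
--             vy = a[1] - p0[1]
--             wx = c[0] - b[0]
--             wy = c[1] - b[1]
--             if vx * wx + vy * wy == 0 and vx * vx + vy * vy == wx * wx + wy * wy:
--                 return 1
--     return 0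
-- ===== Notes on version B (the rewrite author's own statement) =====
-- stated objective: alternative
-- what changed: B does not compute or compare the six pairwise squared distances at all: it tries each of the three opposite-vertex pairings and returns 1 iff one of them gives diagonals that share their midpoint, are perpendicular and are equally long (the classic diagonal characterization of a square, which over integer coordinates accepts exactly the same inputs as A's sorted-distance pattern, including four coincident points).
import Mathlib
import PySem

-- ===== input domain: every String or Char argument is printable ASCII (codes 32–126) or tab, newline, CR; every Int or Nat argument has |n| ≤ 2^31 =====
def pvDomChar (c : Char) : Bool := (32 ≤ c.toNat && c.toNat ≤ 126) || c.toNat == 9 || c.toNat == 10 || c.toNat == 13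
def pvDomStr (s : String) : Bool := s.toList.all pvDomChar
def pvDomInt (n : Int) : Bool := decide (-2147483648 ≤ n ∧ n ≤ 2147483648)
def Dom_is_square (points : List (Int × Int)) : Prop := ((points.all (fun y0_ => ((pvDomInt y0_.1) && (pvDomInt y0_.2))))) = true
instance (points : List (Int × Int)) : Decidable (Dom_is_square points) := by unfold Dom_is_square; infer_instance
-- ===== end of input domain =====

-- B replaces A's distance-multiset test by a geometric diagonal test (shared midpoint,
-- perpendicular, equal length, over the three opposite-vertex pairings); objective: alternative.

-- ===== PORT A =====
def distance_squared (x1 y1 x2 y2 : Int) : Int := (x2 - x1) ^ 2 + (y2 - y1) ^ 2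

def is_square (points : List (Int × Int)) : Int :=
  -- points[i] is ported as pyGet? with a .getD guard; Pre_ (length ≥ 4) makes every access in range
  let distances := (PySem.List.pyRange 0 4 1).foldl (fun acc i =>
    (PySem.List.pyRange (i + 1) 4 1).foldl (fun acc j =>
      let p := (PySem.List.pyGet? points i).getD (0, 0)
      let q := (PySem.List.pyGet? points j).getD (0, 0)
      acc ++ [distance_squared p.1 p.2 q.1 q.2]) acc) ([] : List Int)
  let d := PySem.List.sorted distances (fun x => x) false
  let g := fun (k : Int) => (PySem.List.pyGet? d k).getD 0
  if g 0 = g 1 ∧ g 1 = g 2 ∧ g 2 = g 3 ∧ g 4 = g 5 then 1 else 0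

-- ===== PORT B =====
-- one iteration of B's loop body: the two nested ifs on a candidate pairing (p0,a | b,c)
def branchHit (p0 a b c : Int × Int) : Bool :=
  if p0.1 + a.1 = b.1 + c.1 ∧ p0.2 + a.2 = b.2 + c.2 then
    let vx := a.1 - p0.1
    let vy := a.2 - p0.2
    let wx := c.1 - b.1
    let wy := c.2 - b.2
    decide (vx * wx + vy * wy = 0 ∧ vx * vx + vy * vy = wx * wx + wy * wy)
  else false

def is_square_alt (points : List (Int × Int)) : Int :=
  -- points[0..3] as pyGet?; the early-return for-loop over the three pairings is List.any
  match PySem.List.pyGet? points 0, PySem.List.pyGet? points 1,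
        PySem.List.pyGet? points 2, PySem.List.pyGet? points 3 with
  | some p0, some p1, some p2, some p3 =>
      if [(p1, p2, p3), (p2, p1, p3), (p3, p1, p2)].any
           (fun t => branchHit p0 t.1 t.2.1 t.2.2) then 1 else 0
  | _, _, _, _ => 0

-- ===== PRECONDITION & SPEC =====
-- Both versions raise an IndexError when fewer than 4 points are given; Pre_ excludes exactly those inputs.
def Pre_is_square (points : List (Int × Int)) : Prop := 4 ≤ points.length
instance (points : List (Int × Int)) : Decidable (Pre_is_square points) := by unfold Pre_is_square; infer_instance
def pvWitness_is_square : (List (Int × Int)) := [(0, 0), (0, 1), (1, 1), (1, 0)]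

def Spec_is_square (points : List (Int × Int)) (out : Int) : Prop := out = is_square_alt points
instance (points : List (Int × Int)) (out : Int) : Decidable (Spec_is_square points out) := by unfold Spec_is_square; infer_instance

-- ===== CLAIM (what is proved, stated in full; the proofs are below) =====
def Claim_equal_is_square : Prop := ∀ (points : List (Int × Int)), Dom_is_square points → Pre_is_square points → Spec_is_square points (is_square points)

-- ===== LEMMAS AND PROOFS =====

-- squared distance between two points, the common currency of the proof
def sqd (p q : Int × Int) : Int := (q.1 - p.1) ^ 2 + (q.2 - p.2) ^ 2

theorem sqd_comm (p q : Int × Int) : sqd p q = sqd q p := by unfold sqd; ring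

theorem sqd_nonneg (p q : Int × Int) : 0 ≤ sqd p q := by unfold sqd; positivity

-- A's check on the distance list, factored out for the proof
def checkA (ds : List Int) : Int :=
  let d := PySem.List.sorted ds (fun x => x) false
  let g := fun (k : Int) => (PySem.List.pyGet? d k).getD 0
  if g 0 = g 1 ∧ g 1 = g 2 ∧ g 2 = g 3 ∧ g 4 = g 5 then 1 else 0

def ds4 (p0 p1 p2 p3 : Int × Int) : List Int :=
  [sqd p0 p1, sqd p0 p2, sqd p0 p3, sqd p1 p2, sqd p1 p3, sqd p2 p3]

-- B's loop condition as a Prop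
def BProp (p0 a b c : Int × Int) : Prop :=
  (p0.1 + a.1 = b.1 + c.1 ∧ p0.2 + a.2 = b.2 + c.2) ∧
  (a.1 - p0.1) * (c.1 - b.1) + (a.2 - p0.2) * (c.2 - b.2) = 0 ∧
  (a.1 - p0.1) * (a.1 - p0.1) + (a.2 - p0.2) * (a.2 - p0.2)
    = (c.1 - b.1) * (c.1 - b.1) + (c.2 - b.2) * (c.2 - b.2)

def GProp (p0 p1 p2 p3 : Int × Int) : Prop :=
  BProp p0 p1 p2 p3 ∨ BProp p0 p2 p1 p3 ∨ BProp p0 p3 p1 p2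

theorem branchHit_iff (p0 a b c : Int × Int) : branchHit p0 a b c = true ↔ BProp p0 a b c := by
  unfold branchHit BProp
  split_ifs with h
  · simp [h]
  · simp [h]

theorem distsA_eq (p0 p1 p2 p3 : Int × Int) (rest : List (Int × Int)) :
    ((PySem.List.pyRange 0 4 1).foldl (fun acc i =>
      (PySem.List.pyRange (i + 1) 4 1).foldl (fun acc j =>
        let p := (PySem.List.pyGet? (p0 :: p1 :: p2 :: p3 :: rest) i).getD (0, 0)
        let q := (PySem.List.pyGet? (p0 :: p1 :: p2 :: p3 :: rest) j).getD (0, 0)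
        acc ++ [distance_squared p.1 p.2 q.1 q.2]) acc) ([] : List Int))
    = ds4 p0 p1 p2 p3 := by
  have r0 : PySem.List.pyRange 0 4 1 = [0, 1, 2, 3] := by decide
  have r1 : PySem.List.pyRange (0 + 1) 4 1 = [1, 2, 3] := by decide
  have r2 : PySem.List.pyRange (1 + 1) 4 1 = [2, 3] := by decide
  have r3 : PySem.List.pyRange (2 + 1) 4 1 = [3] := by decide
  have r4 : PySem.List.pyRange (3 + 1) 4 1 = [] := by decide
  have g0 : PySem.List.pyGet? (p0 :: p1 :: p2 :: p3 :: rest) 0 = some p0 := by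
    simp [PySem.List.pyGet?, PySem.List.pyIdx?]; rw [if_pos (by omega)]; simp
  have g1 : PySem.List.pyGet? (p0 :: p1 :: p2 :: p3 :: rest) 1 = some p1 := by
    simp [PySem.List.pyGet?, PySem.List.pyIdx?]; rw [if_pos (by omega)]; simp
  have g2 : PySem.List.pyGet? (p0 :: p1 :: p2 :: p3 :: rest) 2 = some p2 := by
    simp [PySem.List.pyGet?, PySem.List.pyIdx?]; rw [if_pos (by omega)]; simp
  have g3 : PySem.List.pyGet? (p0 :: p1 :: p2 :: p3 :: rest) 3 = some p3 := by
    simp [PySem.List.pyGet?, PySem.List.pyIdx?]; rw [if_pos (by omega)]; simp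
  simp only [r0, List.foldl, r1, r2, r3, r4, g0, g1, g2, g3, Option.getD_some]
  rfl

theorem isA_eq (p0 p1 p2 p3 : Int × Int) (rest : List (Int × Int)) :
    is_square (p0 :: p1 :: p2 :: p3 :: rest) = checkA (ds4 p0 p1 p2 p3) := by
  unfold is_square checkA
  rw [distsA_eq]

theorem get4 (p0 p1 p2 p3 : Int × Int) (rest : List (Int × Int)) :
    PySem.List.pyGet? (p0 :: p1 :: p2 :: p3 :: rest) 0 = some p0 ∧
    PySem.List.pyGet? (p0 :: p1 :: p2 :: p3 :: rest) 1 = some p1 ∧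
    PySem.List.pyGet? (p0 :: p1 :: p2 :: p3 :: rest) 2 = some p2 ∧
    PySem.List.pyGet? (p0 :: p1 :: p2 :: p3 :: rest) 3 = some p3 := by
  refine ⟨?_, ?_, ?_, ?_⟩ <;>
    (simp [PySem.List.pyGet?, PySem.List.pyIdx?]; rw [if_pos (by omega)]; simp)

theorem isB_one_iff (p0 p1 p2 p3 : Int × Int) (rest : List (Int × Int)) :
    is_square_alt (p0 :: p1 :: p2 :: p3 :: rest) = 1 ↔ GProp p0 p1 p2 p3 := by
  obtain ⟨g0, g1, g2, g3⟩ := get4 p0 p1 p2 p3 rest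
  unfold is_square_alt
  rw [g0, g1, g2, g3]
  dsimp only
  simp only [List.any_cons, List.any_nil, Bool.or_false, Bool.or_eq_true]
  split_ifs with h
  · simp only [branchHit_iff] at h
    exact iff_of_true rfl (by unfold GProp; tauto)
  · simp only [branchHit_iff] at h
    refine iff_of_false (by norm_num) ?_
    intro hg
    exact h (by unfold GProp at hg; tauto)

theorem isB_val (p0 p1 p2 p3 : Int × Int) (rest : List (Int × Int)) :
    is_square_alt (p0 :: p1 :: p2 :: p3 :: rest) = 1 ∨
    is_square_alt (p0 :: p1 :: p2 :: p3 :: rest) = 0 := by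
  obtain ⟨g0, g1, g2, g3⟩ := get4 p0 p1 p2 p3 rest
  unfold is_square_alt
  rw [g0, g1, g2, g3]
  dsimp only
  split_ifs <;> simp

-- A returns 1 exactly on distance multisets {lo,lo,lo,lo,hi,hi} with lo ≤ hi
theorem checkA_one_iff (ds : List Int) (h6 : ds.length = 6) :
    checkA ds = 1 ↔ ∃ lo hi : Int, lo ≤ hi ∧ ds.Perm [lo, lo, lo, lo, hi, hi] := by
  constructor
  · intro h
    have hperm : (PySem.List.sorted ds (fun x => x) false).Perm ds := PySem.List.sorted_perm ds _ _
    have hpw : (PySem.List.sorted ds (fun x => x) false).Pairwise (fun a b => a ≤ b) :=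
      PySem.List.sorted_pairwise ds _
    have hlen : (PySem.List.sorted ds (fun x => x) false).length = 6 := by
      rw [hperm.length_eq, h6]
    rcases hsort : PySem.List.sorted ds (fun x => x) false with _ | ⟨a, _ | ⟨b, _ | ⟨c, _ | ⟨d, _ | ⟨e, _ | ⟨f, _ | ⟨x, t⟩⟩⟩⟩⟩⟩⟩ <;>
      rw [hsort] at hlen <;> simp at hlen
    rw [hsort] at hperm hpw
    unfold checkA at h
    rw [hsort] at h
    norm_num [PySem.List.pyGet?, PySem.List.pyIdx?] at h
    simp only [show ((2:Int).toNat) = 2 from rfl, show ((3:Int).toNat) = 3 from rfl, show ((4:Int).toNat) = 4 from rfl, show ((5:Int).toNat) = 5 from rfl, List.getElem_cons_zero, List.getElem_cons_succ] at h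
    obtain ⟨hab, hbc, hcd, hef⟩ := h
    simp only [List.pairwise_cons, List.mem_cons, List.not_mem_nil] at hpw
    have hde : d ≤ e := by tauto
    refine ⟨a, e, by omega, ?_⟩
    have : ds.Perm [a, b, c, d, e, f] := hperm.symm
    rw [hab, hbc, hcd] at this ⊢
    rw [← hef] at this
    exact this
  · rintro ⟨lo, hi, hle, hperm⟩
    have hsort : PySem.List.sorted ds (fun x => x) false = [lo, lo, lo, lo, hi, hi] := by
      apply PySem.List.sorted_id_eq_of_perm_of_pairwise
      · exact hperm.symm
      · simp only [List.pairwise_cons, List.mem_cons, List.not_mem_nil]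
        constructor
        · rintro a' (rfl | rfl | rfl | rfl | rfl | h) <;> first | rfl | exact hle | simp at h
        constructor
        · rintro a' (rfl | rfl | rfl | rfl | h) <;> first | rfl | exact hle | simp at h
        constructor
        · rintro a' (rfl | rfl | rfl | h) <;> first | rfl | exact hle | simp at h
        constructor
        · rintro a' (rfl | rfl | h) <;> first | rfl | exact hle | simp at h
        constructor
        · rintro a' (rfl | h) <;> first | rfl | simp at h
        simp
    unfold checkA
    rw [hsort]
    norm_num [PySem.List.pyGet?, PySem.List.pyIdx?]
    simp only [show ((2:Int).toNat) = 2 from rfl, show ((3:Int).toNat) = 3 from rfl, show ((4:Int).toNat) = 4 from rfl, show ((5:Int).toNat) = 5 from rfl, List.getElem_cons_zero, List.getElem_cons_succ]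
    exact ⟨trivial, trivial, trivial⟩

theorem checkA_val (ds : List Int) : checkA ds = 1 ∨ checkA ds = 0 := by
  unfold checkA; dsimp only; split_ifs <;> simp

-- √3 is irrational, integer form
theorem key_nat : ∀ y x : ℕ, x ^ 2 = 3 * y ^ 2 → y = 0 := by
  intro y
  induction y using Nat.strong_induction_on with
  | _ y ih =>
    intro x h
    by_contra hy
    have hp : Nat.Prime 3 := by norm_num
    have h3x : 3 ∣ x := hp.dvd_of_dvd_pow ⟨y ^ 2, h⟩
    obtain ⟨x', rfl⟩ := h3x
    have h' : y ^ 2 = 3 * x' ^ 2 := by nlinarith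
    have h3y : 3 ∣ y := hp.dvd_of_dvd_pow ⟨x' ^ 2, h'⟩
    obtain ⟨y', rfl⟩ := h3y
    have h'' : x' ^ 2 = 3 * y' ^ 2 := by nlinarith
    exact absurd (ih y' (by omega) x' h'') (by omega)

theorem key_int (x y : Int) (h : x ^ 2 = 3 * y ^ 2) : y = 0 := by
  have h' : x.natAbs ^ 2 = 3 * y.natAbs ^ 2 := by
    have := congrArg Int.natAbs h
    simpa [Int.natAbs_mul, Int.natAbs_pow] using this
  have := key_nat y.natAbs x.natAbs h'
  omega

-- there is no lattice equilateral triangle with positive squared side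
theorem no_equilateral (t u v : Int × Int) (lo : Int) (hpos : 0 < lo)
    (h1 : sqd t u = lo) (h2 : sqd t v = lo) (h3 : sqd u v = lo) : False := by
  obtain ⟨t1, t2⟩ := t; obtain ⟨u1, u2⟩ := u; obtain ⟨v1, v2⟩ := v
  unfold sqd at h1 h2 h3
  simp only at h1 h2 h3
  have h4 : 2 * ((u1 - t1) * (v1 - t1) + (u2 - t2) * (v2 - t2)) = lo := by
    linear_combination h1 + h2 - h3
  have hkey : (2 * ((u1 - t1) * (v2 - t2) - (u2 - t2) * (v1 - t1))) ^ 2 = 3 * lo ^ 2 := by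
    linear_combination (4 * ((v1 - t1) ^ 2 + (v2 - t2) ^ 2)) * h1 + (4 * lo) * h2
      - (2 * ((u1 - t1) * (v1 - t1) + (u2 - t2) * (v2 - t2)) + lo) * h4
  have := key_int _ _ hkey
  omega

-- two hi-edges sharing a vertex are impossible
theorem sqd_zero {p q : Int × Int} (h : sqd p q = 0) : p = q := by
  obtain ⟨p1, p2⟩ := p; obtain ⟨q1, q2⟩ := q
  unfold sqd at h
  simp only at h
  have h1 : p1 = q1 := by nlinarith [sq_nonneg (q1 - p1), sq_nonneg (q2 - p2)]
  have h2 : p2 = q2 := by nlinarith [sq_nonneg (q1 - p1), sq_nonneg (q2 - p2)]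
  simp [h1, h2]

theorem sqd_self (p : Int × Int) : sqd p p = 0 := by unfold sqd; ring

theorem adj_contra (s t u v : Int × Int) (lo hi : Int) (hlt : lo < hi)
    (hst : sqd s t = hi) (_hsu : sqd s u = hi) (hsv : sqd s v = lo)
    (htu : sqd t u = lo) (htv : sqd t v = lo) (huv : sqd u v = lo) : False := by
  have hlo : 0 ≤ lo := hsv ▸ sqd_nonneg s v
  rcases eq_or_lt_of_le hlo with h0 | h0
  · have hv : s = v := sqd_zero (by rw [hsv]; omega)
    have ht : t = v := sqd_zero (by rw [htv]; omega)
    rw [hv, ht, sqd_self] at hst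
    omega
  · exact no_equilateral t u v lo h0 htu htv huv

-- disjoint hi-edges force B's branch conditions
theorem disj (p0 a b c : Int × Int) (lo hi : Int) (hlt : lo < hi)
    (h0a : sqd p0 a = hi) (hbc : sqd b c = hi) (h0b : sqd p0 b = lo)
    (h0c : sqd p0 c = lo) (hab : sqd a b = lo) (hac : sqd a c = lo) :
    BProp p0 a b c := by
  have hlo : 0 ≤ lo := h0b ▸ sqd_nonneg p0 b
  have hhi : 0 < hi := by omega
  obtain ⟨x0, y0⟩ := p0; obtain ⟨x1, y1⟩ := a; obtain ⟨x2, y2⟩ := b; obtain ⟨x3, y3⟩ := c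
  unfold sqd at h0a hbc h0b h0c hab hac
  unfold BProp
  simp only at h0a hbc h0b h0c hab hac ⊢
  have hperp : (x1 - x0) * (x3 - x2) + (y1 - y0) * (y3 - y2) = 0 := by
    have h2 : 2 * ((x1 - x0) * (x3 - x2) + (y1 - y0) * (y3 - y2)) = 0 := by
      linear_combination h0c - hac - h0b + hab
    linarith
  have hum : (x1 - x0) * (x0 + x1 - x2 - x3) + (y1 - y0) * (y0 + y1 - y2 - y3) = 0 := by
    have h2 : 2 * ((x1 - x0) * (x0 + x1 - x2 - x3) + (y1 - y0) * (y0 + y1 - y2 - y3)) = 0 := by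
      linear_combination -h0b + hab - h0c + hac
    linarith
  have hwm : (x3 - x2) * (x0 + x1 - x2 - x3) + (y3 - y2) * (y0 + y1 - y2 - y3) = 0 := by
    have h2 : 2 * ((x3 - x2) * (x0 + x1 - x2 - x3) + (y3 - y2) * (y0 + y1 - y2 - y3)) = 0 := by
      linear_combination h0b - h0c + hab - hac
    linarith
  have hd2 : ((x1 - x0) * (y3 - y2) - (y1 - y0) * (x3 - x2)) ^ 2 = hi ^ 2 := by
    linear_combination ((x3 - x2) ^ 2 + (y3 - y2) ^ 2) * h0a + hi * hbc
      - ((x1 - x0) * (x3 - x2) + (y1 - y0) * (y3 - y2)) * hperp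
  have hdne : (x1 - x0) * (y3 - y2) - (y1 - y0) * (x3 - x2) ≠ 0 := by
    intro h
    rw [h] at hd2
    nlinarith
  have hm1 : x0 + x1 - x2 - x3 = 0 := by
    have hmul : (x0 + x1 - x2 - x3) * ((x1 - x0) * (y3 - y2) - (y1 - y0) * (x3 - x2)) = 0 := by
      linear_combination (y3 - y2) * hum - (y1 - y0) * hwm
    rcases mul_eq_zero.mp hmul with h | h
    · exact h
    · exact absurd h hdne
  have hm2 : y0 + y1 - y2 - y3 = 0 := by
    have hmul : (y0 + y1 - y2 - y3) * ((x1 - x0) * (y3 - y2) - (y1 - y0) * (x3 - x2)) = 0 := by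
      linear_combination (x1 - x0) * hwm - (x3 - x2) * hum
    rcases mul_eq_zero.mp hmul with h | h
    · exact h
    · exact absurd h hdne
  refine ⟨⟨by omega, by omega⟩, hperp, by linear_combination h0a - hbc⟩

-- B's branch conditions force the {lo,lo,lo,lo,hi,hi} distance multiset
theorem branch_to_perm (p0 a b c : Int × Int) (h : BProp p0 a b c) :
    sqd p0 c = sqd p0 b ∧ sqd a b = sqd p0 b ∧ sqd a c = sqd p0 b ∧
    sqd b c = sqd p0 a ∧ sqd p0 a = 2 * sqd p0 b := by
  obtain ⟨x0, y0⟩ := p0; obtain ⟨x1, y1⟩ := a; obtain ⟨x2, y2⟩ := b; obtain ⟨x3, y3⟩ := c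
  obtain ⟨⟨hm1, hm2⟩, hperp, hnorm⟩ := h
  simp only at hm1 hm2 hperp hnorm
  have hx3 : x3 = x0 + x1 - x2 := by omega
  have hy3 : y3 = y0 + y1 - y2 := by omega
  subst hx3; subst hy3
  unfold sqd
  simp only
  refine ⟨by linear_combination hperp, by linear_combination hperp, by ring, by linear_combination -hnorm, ?_⟩
  have h5 : 2 * ((x1 - x0) ^ 2 + (y1 - y0) ^ 2) = 2 * (2 * ((x2 - x0) ^ 2 + (y2 - y0) ^ 2)) := by
    linear_combination 2 * hperp + hnorm
  linarith

theorem perm6 (lo hi : Int) : ([hi, lo, lo, lo, lo, hi] : List Int).Perm [lo, lo, lo, lo, hi, hi] := by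
  refine List.perm_iff_count.mpr fun x => ?_
  simp only [List.count_cons, List.count_nil]
  split_ifs <;> rfl

theorem perm6b (lo hi : Int) : ([lo, hi, lo, lo, hi, lo] : List Int).Perm [lo, lo, lo, lo, hi, hi] := by
  refine List.perm_iff_count.mpr fun x => ?_
  simp only [List.count_cons, List.count_nil]
  split_ifs <;> rfl

theorem perm6c (lo hi : Int) : ([lo, lo, hi, hi, lo, lo] : List Int).Perm [lo, lo, lo, lo, hi, hi] := by
  refine List.perm_iff_count.mpr fun x => ?_
  simp only [List.count_cons, List.count_nil]
  split_ifs <;> rfl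

-- the heart: A returns 1 exactly when B's geometric condition holds
theorem checkA_iff_G (p0 p1 p2 p3 : Int × Int) :
    checkA (ds4 p0 p1 p2 p3) = 1 ↔ GProp p0 p1 p2 p3 := by
  rw [checkA_one_iff _ (by simp [ds4])]
  constructor
  · rintro ⟨lo, hi, hle, hperm⟩
    rcases eq_or_lt_of_le hle with heq | hlt
    · subst heq
      have hall : ∀ x ∈ ds4 p0 p1 p2 p3, x = lo := by
        intro x hx
        have := hperm.mem_iff.mp hx
        simp at this
        tauto
      have d01 : sqd p0 p1 = lo := hall _ (by simp [ds4])
      have d02 : sqd p0 p2 = lo := hall _ (by simp [ds4])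
      have d12 : sqd p1 p2 = lo := hall _ (by simp [ds4])
      have d13 : sqd p1 p3 = lo := hall _ (by simp [ds4])
      have d23 : sqd p2 p3 = lo := hall _ (by simp [ds4])
      have hlo : 0 ≤ lo := d01 ▸ sqd_nonneg p0 p1
      rcases eq_or_lt_of_le hlo with h0 | h0
      · have e1 : p0 = p1 := sqd_zero (by rw [d01]; omega)
        have e2 : p2 = p3 := sqd_zero (by rw [d23]; omega)
        have e12 : p0 = p2 := sqd_zero (by rw [d02]; omega)
        left
        rw [← e1, ← e2, ← e12]
        unfold BProp
        exact ⟨⟨rfl, rfl⟩, by ring, by ring⟩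
      · exact (no_equilateral p1 p2 p3 lo h0 d12 d13 d23).elim
    · have hm : ∀ x ∈ ds4 p0 p1 p2 p3, x = lo ∨ x = hi := by
        intro x hx
        have := hperm.mem_iff.mp hx
        simp at this
        tauto
      have m1 : sqd p0 p1 = lo ∨ sqd p0 p1 = hi := hm _ (by simp [ds4])
      have m2 : sqd p0 p2 = lo ∨ sqd p0 p2 = hi := hm _ (by simp [ds4])
      have m3 : sqd p0 p3 = lo ∨ sqd p0 p3 = hi := hm _ (by simp [ds4])
      have m4 : sqd p1 p2 = lo ∨ sqd p1 p2 = hi := hm _ (by simp [ds4])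
      have m5 : sqd p1 p3 = lo ∨ sqd p1 p3 = hi := hm _ (by simp [ds4])
      have m6 : sqd p2 p3 = lo ∨ sqd p2 p3 = hi := hm _ (by simp [ds4])
      have hcnt : (ds4 p0 p1 p2 p3).count hi = 2 := by
        rw [hperm.count_eq]
        simp [hlt.ne]
      rcases m1 with h1 | h1 <;> rcases m2 with h2 | h2 <;> rcases m3 with h3 | h3 <;>
        rcases m4 with h4 | h4 <;> rcases m5 with h5 | h5 <;> rcases m6 with h6 | h6 <;>
        simp [ds4, h1, h2, h3, h4, h5, h6, hlt.ne] at hcnt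
      -- the 15 combinations with exactly two large distances, in rcases order
      · exact (adj_contra p3 p1 p2 p0 lo hi hlt ((sqd_comm p3 p1).trans h5)
          ((sqd_comm p3 p2).trans h6) ((sqd_comm p3 p0).trans h3) h4
          ((sqd_comm p1 p0).trans h1) ((sqd_comm p2 p0).trans h2)).elim
      · exact (adj_contra p2 p1 p3 p0 lo hi hlt ((sqd_comm p2 p1).trans h4) h6
          ((sqd_comm p2 p0).trans h2) h5 ((sqd_comm p1 p0).trans h1)
          ((sqd_comm p3 p0).trans h3)).elim
      · exact (adj_contra p1 p2 p3 p0 lo hi hlt h4 h5 ((sqd_comm p1 p0).trans h1)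
          h6 ((sqd_comm p2 p0).trans h2) ((sqd_comm p3 p0).trans h3)).elim
      · exact (adj_contra p3 p0 p2 p1 lo hi hlt ((sqd_comm p3 p0).trans h3)
          ((sqd_comm p3 p2).trans h6) ((sqd_comm p3 p1).trans h5) h2 h1
          ((sqd_comm p2 p1).trans h4)).elim
      · exact (adj_contra p3 p0 p1 p2 lo hi hlt ((sqd_comm p3 p0).trans h3)
          ((sqd_comm p3 p1).trans h5) ((sqd_comm p3 p2).trans h6) h1 h2 h4).elim
      · exact Or.inr (Or.inr (disj p0 p3 p1 p2 lo hi hlt h3 h4 h1 h2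
          ((sqd_comm p3 p1).trans h5) ((sqd_comm p3 p2).trans h6)))
      · exact (adj_contra p2 p0 p3 p1 lo hi hlt ((sqd_comm p2 p0).trans h2) h6
          ((sqd_comm p2 p1).trans h4) h3 h1 ((sqd_comm p3 p1).trans h5)).elim
      · exact Or.inr (Or.inl (disj p0 p2 p1 p3 lo hi hlt h2 h5 h1 h3
          ((sqd_comm p2 p1).trans h4) h6))
      · exact (adj_contra p2 p0 p1 p3 lo hi hlt ((sqd_comm p2 p0).trans h2)
          ((sqd_comm p2 p1).trans h4) h6 h1 h3 h5).elim
      · exact (adj_contra p0 p2 p3 p1 lo hi hlt h2 h3 h1 h6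
          ((sqd_comm p2 p1).trans h4) ((sqd_comm p3 p1).trans h5)).elim
      · exact Or.inl (disj p0 p1 p2 p3 lo hi hlt h1 h6 h2 h3 h4 h5)
      · exact (adj_contra p1 p0 p3 p2 lo hi hlt ((sqd_comm p1 p0).trans h1) h5 h4
          h3 h2 ((sqd_comm p3 p2).trans h6)).elim
      · exact (adj_contra p1 p0 p2 p3 lo hi hlt ((sqd_comm p1 p0).trans h1) h4 h5
          h2 h3 h6).elim
      · exact (adj_contra p0 p1 p3 p2 lo hi hlt h1 h3 h2 h5 h4
          ((sqd_comm p3 p2).trans h6)).elim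
      · exact (adj_contra p0 p1 p2 p3 lo hi hlt h1 h2 h3 h4 h5 h6).elim
  · intro hg
    rcases hg with hb | hb | hb
    · obtain ⟨e1, e2, e3, e4, e5⟩ := branch_to_perm p0 p1 p2 p3 hb
      refine ⟨sqd p0 p2, sqd p0 p1, by have := sqd_nonneg p0 p2; omega, ?_⟩
      show ([sqd p0 p1, sqd p0 p2, sqd p0 p3, sqd p1 p2, sqd p1 p3, sqd p2 p3] : List Int).Perm _
      rw [e1, e2, e3, e4]
      exact perm6 _ _
    · obtain ⟨e1, e2, e3, e4, e5⟩ := branch_to_perm p0 p2 p1 p3 hb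
      refine ⟨sqd p0 p1, sqd p0 p2, by have := sqd_nonneg p0 p1; omega, ?_⟩
      show ([sqd p0 p1, sqd p0 p2, sqd p0 p3, sqd p1 p2, sqd p1 p3, sqd p2 p3] : List Int).Perm _
      rw [e1, (sqd_comm p1 p2).trans e2, e3, e4]
      exact perm6b _ _
    · obtain ⟨e1, e2, e3, e4, e5⟩ := branch_to_perm p0 p3 p1 p2 hb
      refine ⟨sqd p0 p1, sqd p0 p3, by have := sqd_nonneg p0 p1; omega, ?_⟩
      show ([sqd p0 p1, sqd p0 p2, sqd p0 p3, sqd p1 p2, sqd p1 p3, sqd p2 p3] : List Int).Perm _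
      rw [e1, e4, (sqd_comm p1 p3).trans e2, (sqd_comm p2 p3).trans e3]
      exact perm6c _ _

-- ===== VERDICT (by name: the statement is the Claim_ definition above) =====
theorem is_square_spec : Claim_equal_is_square := by
  intro points _ hpre
  unfold Pre_is_square at hpre
  match points, hpre with
  | p0 :: p1 :: p2 :: p3 :: rest, _ =>
    unfold Spec_is_square
    rw [isA_eq]
    by_cases h : GProp p0 p1 p2 p3
    · rw [(checkA_iff_G p0 p1 p2 p3).mpr h, ((isB_one_iff p0 p1 p2 p3 rest).mpr h)]
    · have ha : checkA (ds4 p0 p1 p2 p3) = 0 := by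
        rcases checkA_val (ds4 p0 p1 p2 p3) with h1 | h1
        · exact absurd ((checkA_iff_G p0 p1 p2 p3).mp h1) h
        · exact h1
      have hb : is_square_alt (p0 :: p1 :: p2 :: p3 :: rest) = 0 := by
        rcases isB_val p0 p1 p2 p3 rest with h1 | h1
        · exact absurd ((isB_one_iff p0 p1 p2 p3 rest).mp h1) h
        · exact h1
      rw [ha, hb]
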